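-- pv_equiv track=rewrite | github.com/Xilinx/SDFEC-PYNQ | rfsoc_sdfec/__init__.py | _calc_stats_mask
-- ===== SOURCE A (Python) =====
-- from typing import Tuple
--
-- def _calc_stats_mask(k: int) -> Tuple[int, int, int, int]:
--     bits = k % 128
--
--     # Short-circuit on zero bits
--     if bits == 0:
--         return (0xFFFFFFFF, 0xFFFFFFFF, 0xFFFFFFFF, 0xFFFFFFFF)
--
--     masks = [0,0,0,0]
--     for i in range(4):
--         if bits >= 32:
--             masks[i] = 0xFFFFFFFF
--             bits -= 32
--         else:
--             masks[i] = 0x7FFFFFFF >> (31-bits)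
--             bits = 0
--     return (masks[0], masks[1], masks[2], masks[3])
-- ===== SOURCE B (Python) =====
-- from typing import Tuple
--
-- def _calc_stats_mask(k: int) -> Tuple[int, int, int, int]:
--     n = (k % 128) or 128
--     full = (1 << n) - 1
--     return tuple((full >> (32 * i)) & 0xFFFFFFFF for i in range(4))
-- ===== Notes on version B (the rewrite author's own statement) =====
-- stated objective: simpler
-- what changed: Replaces the stateful chunk-subtracting loop over a mutable 4-slot list with a closed-form construction: build one integer of n low ones (n = k%128, or 128 when that is 0) and slice it into four little-endian 32-bit words.
import Mathlib
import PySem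

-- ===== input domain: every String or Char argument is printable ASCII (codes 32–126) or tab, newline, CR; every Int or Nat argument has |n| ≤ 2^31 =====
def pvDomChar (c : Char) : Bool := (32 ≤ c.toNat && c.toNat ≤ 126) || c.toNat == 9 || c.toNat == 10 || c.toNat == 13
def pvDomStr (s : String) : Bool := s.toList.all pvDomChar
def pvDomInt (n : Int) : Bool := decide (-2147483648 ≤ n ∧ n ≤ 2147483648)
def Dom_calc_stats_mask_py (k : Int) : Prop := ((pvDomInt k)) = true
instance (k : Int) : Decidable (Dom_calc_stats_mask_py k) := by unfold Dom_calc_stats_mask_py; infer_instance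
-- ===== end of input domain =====

-- B replaces A's chunk-subtracting loop with a closed-form bitmask (n low ones, sliced into four 32-bit words); objective: simpler.


-- ===== PORT A =====
-- loop body over range(4) with state (masks list, remaining bits), as in A
def pvABody (bits0 : Int) : Int × Int × Int × Int :=
  if bits0 = 0 then (0xFFFFFFFF, 0xFFFFFFFF, 0xFFFFFFFF, 0xFFFFFFFF)
  else
    let s := (List.range 4).foldl
      (fun (st : List Int × Int) i =>
        if st.2 ≥ 32 then (st.1.set i 0xFFFFFFFF, st.2 - 32)
        else (st.1.set i ((0x7FFFFFFF : Int) >>> (31 - st.2).toNat), 0))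
      ([0, 0, 0, 0], bits0)
    (s.1.getD 0 0, s.1.getD 1 0, s.1.getD 2 0, s.1.getD 3 0)

def calc_stats_mask_py (k : Int) : Int × Int × Int × Int :=
  pvABody (PySem.Int.mod k 128)

-- ===== PORT B =====
def pvBBody (bits : Int) : Int × Int × Int × Int :=
  let n : Int := if bits ≠ 0 then bits else 128     -- (k % 128) or 128
  let full : Int := (1 <<< n.toNat) - 1
  (PySem.Int.band (full >>> (32 * 0)) 0xFFFFFFFF,
   PySem.Int.band (full >>> (32 * 1)) 0xFFFFFFFF,
   PySem.Int.band (full >>> (32 * 2)) 0xFFFFFFFF,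
   PySem.Int.band (full >>> (32 * 3)) 0xFFFFFFFF)

def calc_stats_mask_py_alt (k : Int) : Int × Int × Int × Int :=
  pvBBody (PySem.Int.mod k 128)

-- ===== PRECONDITION & SPEC =====
def Spec_calc_stats_mask_py (k : Int) (out : Int × Int × Int × Int) : Prop := out = calc_stats_mask_py_alt k
instance (k : Int) (out : Int × Int × Int × Int) : Decidable (Spec_calc_stats_mask_py k out) := by unfold Spec_calc_stats_mask_py; infer_instance

-- ===== CLAIM (what is proved, stated in full; the proofs are below) =====
def Claim_equal_calc_stats_mask_py : Prop := ∀ (k : Int), Dom_calc_stats_mask_py k → Spec_calc_stats_mask_py k (calc_stats_mask_py k)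

-- ===== LEMMAS AND PROOFS =====
theorem pvBody_eq (n : Nat) (h : n < 128) : pvABody (n : Int) = pvBBody (n : Int) := by
  interval_cases n <;> decide

-- ===== VERDICT (by name: the statement is the Claim_ definition above) =====
theorem calc_stats_mask_py_spec : Claim_equal_calc_stats_mask_py := by
  intro k _
  unfold Spec_calc_stats_mask_py calc_stats_mask_py calc_stats_mask_py_alt
  have h0 : 0 ≤ PySem.Int.mod k 128 := PySem.Int.mod_nonneg k (by norm_num)
  have h1 : PySem.Int.mod k 128 < 128 := PySem.Int.mod_lt k (by norm_num)
  obtain ⟨n, hn⟩ := Int.eq_ofNat_of_zero_le h0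
  rw [hn]
  exact pvBody_eq n (by omega)
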